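-- pv_equiv track=rewrite | github.com/YewYew/The-Matchless-Kungfu-Meridians-Tool | MeridiansTool.py | find_maximum_concatenation
-- ===== SOURCE A (Python) =====
-- def concatenate_with_overlap(str1, str2):
-- 	max_overlap = min(len(str1), len(str2))
-- 	for i in range(max_overlap, 0, -1):
-- 		if str1[-i:] == str2[:i]:
-- 			return str1 + str2[i:]
-- 	return str1 + str2
--
-- def find_maximum_concatenation(skills, meridians_count):
-- 	skill_patterns = list(skills.values())
-- 	skill_names = list(skills.keys())
-- 	n = len(skill_patterns)
--
-- 	# Initialize DP (Dynamic Programming) arrays for the calculation(s) size/skill list/pattern.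
-- 	dp_skills_count = [0] * (1 << n)
-- 	dp_used_skills = [[] for _ in range(1 << n)]
-- 	dp_patterns = [''] * (1 << n)
-- 	pattern_set = set()  # Set (Unordered List) used for the patterns.
--
-- 	# Calculate all valid concatenated patterns.
-- 	for i in range(1 << n):
-- 		current_pattern = ''
-- 		current_skills = []
-- 		for j in range(n):
-- 			if i & (1 << j):
-- 				new_pattern = concatenate_with_overlap(current_pattern, skill_patterns[j])
-- 				if len(new_pattern) <= meridians_count:
-- 					current_pattern = new_pattern
-- 					current_skills.append(skill_names[j])
-- 					dp_skills_count[i] = len(set(current_skills))  # Count unique skills.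
-- 					dp_used_skills[i] = current_skills # Add the skills to the "blacklist".
-- 					dp_patterns[i] = current_pattern # Add the pattern itself.
--
-- 	# Store unique patterns in the set.
-- 	if current_pattern not in pattern_set:
-- 		pattern_set.add(current_pattern)
--
-- 	# Find the maximum number of unique skills used in the patterns.
-- 	max_skills_count = max(dp_skills_count)
--
-- 	# Collect patterns with the maximum number of unique skills (Best).
-- 	best_patterns = []
-- 	seen_patterns = set()  # For tracking seen patterns to prevent duplicates.
--
-- 	for i in range(1 << n):
-- 		if dp_skills_count[i] == max_skills_count:
-- 			if dp_patterns[i] not in seen_patterns:  # Check if pattern is unique.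
-- 				best_patterns.append((len(dp_patterns[i]), dp_used_skills[i], dp_patterns[i]))
-- 				seen_patterns.add(dp_patterns[i])  # Mark pattern as duplicate (Seen).
--
-- 	return best_patterns
-- ===== SOURCE B (Python) =====
-- def _merge(s, t):
-- 	# concatenate with the largest suffix/prefix overlap
-- 	for k in range(min(len(s), len(t)), 0, -1):
-- 		if s[-k:] == t[:k]:
-- 			return s + t[k:]
-- 	return s + t
--
-- def find_maximum_concatenation(skills, meridians_count):
-- 	names = list(skills.keys())
-- 	pats = list(skills.values())
-- 	n = len(names)
--
-- 	# Subset DP: the state of subset i extends the state of i minus its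
-- 	# highest bit by one merge, instead of replaying all n bits per subset.
-- 	states = [("", [])]
-- 	for i in range(1, 1 << n):
-- 		h = i.bit_length() - 1
-- 		pattern, used = states[i - (1 << h)]
-- 		new_pattern = _merge(pattern, pats[h])
-- 		if len(new_pattern) <= meridians_count:
-- 			states.append((new_pattern, used + [names[h]]))
-- 		else:
-- 			states.append((pattern, used))
--
-- 	counts = [len(used) for _, used in states]  # dict keys are unique
-- 	best = max(counts)
--
-- 	result = []
-- 	seen = set()
-- 	for i in range(1 << n):
-- 		if counts[i] == best:
-- 			pattern, used = states[i]
-- 			if pattern not in seen: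
-- 				result.append((len(pattern), used, pattern))
-- 				seen.add(pattern)
-- 	return result
-- ===== Notes on version B (the rewrite author's own statement) =====
-- stated objective: faster
-- what changed: Instead of replaying all n bits to rebuild each subset's greedy pattern from scratch, B computes each subset's state with a single overlap-merge from the state of the subset minus its highest bit (subset DP), and drops the redundant dp arrays and per-step set() recount.
import Mathlib
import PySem

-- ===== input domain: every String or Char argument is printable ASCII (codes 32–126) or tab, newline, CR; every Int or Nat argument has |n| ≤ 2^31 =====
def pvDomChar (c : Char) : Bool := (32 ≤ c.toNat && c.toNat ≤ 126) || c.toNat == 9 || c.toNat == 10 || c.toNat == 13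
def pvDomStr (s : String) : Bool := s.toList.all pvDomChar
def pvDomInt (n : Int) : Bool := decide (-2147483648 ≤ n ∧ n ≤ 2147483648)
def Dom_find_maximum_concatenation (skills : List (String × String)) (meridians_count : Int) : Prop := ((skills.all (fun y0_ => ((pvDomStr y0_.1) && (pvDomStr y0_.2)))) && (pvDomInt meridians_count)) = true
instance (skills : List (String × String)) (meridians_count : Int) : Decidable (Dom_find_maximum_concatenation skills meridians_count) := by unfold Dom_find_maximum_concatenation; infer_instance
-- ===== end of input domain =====

-- B replaces A's per-subset replay of all n bits by a subset DP that extends the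
-- state of (subset minus its highest bit) with a single overlap-merge (objective: faster).
-- Both ports work on patterns as List Char (PySem convention) and turn them into String
-- only in the returned tuples; `skills` is a Python dict, modelled as insertion-ordered
-- association list normalised through PySem.Dict.ofList (duplicate keys: first position,
-- last value — exactly Python's dict(...) semantics the callee sees).

-- ===== PORT A =====
-- for i in range(max_overlap, 0, -1): counted down by structural recursion on i.
-- For 1 ≤ i ≤ len(str1): str1[-i:] = drop (len-i), str2[:i] = take i, str2[i:] = drop i — exact
-- Python slice semantics on this range (i never exceeds min of the lengths).
def cwoLoop (str1 str2 : List Char) : Nat → List Char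
  | 0 => str1 ++ str2
  | i+1 =>
    if str1.drop (str1.length - (i+1)) = str2.take (i+1) then str1 ++ str2.drop (i+1)
    else cwoLoop str1 str2 i

def concatenate_with_overlap (str1 str2 : List Char) : List Char :=
  cwoLoop str1 str2 (min str1.length str2.length)

-- one step of A's inner `for j in range(n)` loop; state = (current_pattern, current_skills,
-- dp_skills_count, dp_used_skills, dp_patterns).  `i & (1 << j)` truthiness on nonnegative
-- ints is exactly `i &&& (1 <<< j) ≠ 0` on Nat; list indexing with j < n / i < 2^n is in
-- range, so `getD` / `List.set` are exact.
def aInner (pats : List (List Char)) (names : List String) (mc : Int) (i : Nat)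
    (st : List Char × List String × List Int × List (List String) × List (List Char)) (j : Nat) :
    List Char × List String × List Int × List (List String) × List (List Char) :=
  let (cur, sk, dpc, dpu, dpp) := st
  if i &&& (1 <<< j) ≠ 0 then
    let np := concatenate_with_overlap cur (pats.getD j [])
    if (np.length : Int) ≤ mc then
      let sk' := sk ++ [names.getD j ""]
      (np, sk', dpc.set i ((PySem.Set.ofList sk').length : Int), dpu.set i sk', dpp.set i np)
    else st
  else st

-- A's dead `pattern_set` block (a set built once after the loop and never read) does not
-- influence the returned value and is omitted.  max(dp_skills_count) is PySem.List.maxD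
-- (first maximum, like Python's max); the list has length 2^n ≥ 1, so the default is unreachable.
def find_maximum_concatenation (skills : List (String × String)) (meridians_count : Int) : List (Int × List String × String) :=
  let d := PySem.Dict.ofList skills
  let skill_patterns := d.values.map String.toList
  let skill_names := d.keys
  let n := skill_patterns.length
  let res := (List.range (1 <<< n)).foldl
    (fun (acc : List Int × List (List String) × List (List Char)) i =>
      let (dpc, dpu, dpp) := acc
      let r := (List.range n).foldl (aInner skill_patterns skill_names meridians_count i) ([], [], dpc, dpu, dpp)
      (r.2.2.1, r.2.2.2.1, r.2.2.2.2))
    (List.replicate (1 <<< n) 0, List.replicate (1 <<< n) [], List.replicate (1 <<< n) [])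
  let dpc := res.1
  let dpu := res.2.1
  let dpp := res.2.2
  let max_skills_count := PySem.List.maxD dpc (fun x => x) 0
  ((List.range (1 <<< n)).foldl
    (fun (acc : List (Int × List String × String) × PySem.Set (List Char)) i =>
      if dpc.getD i 0 = max_skills_count then
        if ¬ acc.2.contains (dpp.getD i []) then
          (acc.1 ++ [(((dpp.getD i []).length : Int), dpu.getD i [], String.ofList (dpp.getD i []))],
           acc.2.add (dpp.getD i []))
        else acc
      else acc)
    ([], PySem.Set.empty)).1

-- ===== PORT B =====
-- Source B's `_merge` is character-for-character the same descending-overlap loop as A's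
-- helper, so it is ported by the same function `concatenate_with_overlap` above.
-- `range(1, 1 << n)` over nonnegative ints is List.range' 1 (2^n - 1); for i ≥ 1,
-- `i.bit_length() - 1` is Nat.log2 i; `states[i - (1 << h)]` has index < i = current
-- length, so `getD` is exact.
def find_maximum_concatenation_alt (skills : List (String × String)) (meridians_count : Int) : List (Int × List String × String) :=
  let d := PySem.Dict.ofList skills
  let names := d.keys
  let pats := d.values.map String.toList
  let n := names.length
  let states := (List.range' 1 (1 <<< n - 1)).foldl
    (fun (states : List (List Char × List String)) i =>
      let h := i.log2
      let st := states.getD (i - (1 <<< h)) ([], [])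
      let np := concatenate_with_overlap st.1 (pats.getD h [])
      if (np.length : Int) ≤ meridians_count then states ++ [(np, st.2 ++ [names.getD h ""])]
      else states ++ [st])
    [([], [])]
  let counts := states.map (fun s => (s.2.length : Int))
  let best := PySem.List.maxD counts (fun x => x) 0
  ((List.range (1 <<< n)).foldl
    (fun (acc : List (Int × List String × String) × PySem.Set (List Char)) i =>
      if counts.getD i 0 = best then
        let st := states.getD i ([], [])
        if ¬ acc.2.contains st.1 then
          (acc.1 ++ [((st.1.length : Int), st.2, String.ofList st.1)], acc.2.add st.1)
        else acc
      else acc)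
    ([], PySem.Set.empty)).1

-- ===== PRECONDITION & SPEC =====
def Spec_find_maximum_concatenation (skills : List (String × String)) (meridians_count : Int) (out : List (Int × List String × String)) : Prop := out = find_maximum_concatenation_alt skills meridians_count
instance (skills : List (String × String)) (meridians_count : Int) (out : List (Int × List String × String)) : Decidable (Spec_find_maximum_concatenation skills meridians_count out) := by unfold Spec_find_maximum_concatenation; infer_instance

-- ===== CLAIM (what is proved, stated in full; the proofs are below) =====
def Claim_equal_find_maximum_concatenation : Prop := ∀ (skills : List (String × String)) (meridians_count : Int), Dom_find_maximum_concatenation skills meridians_count → Spec_find_maximum_concatenation skills meridians_count (find_maximum_concatenation skills meridians_count)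

-- ===== LEMMAS AND PROOFS =====

-- the pure greedy step both algorithms perform for bit j
def pvStep (pats : List (List Char)) (names : List String) (mc : Int)
    (st : List Char × List String) (j : Nat) : List Char × List String :=
  let np := concatenate_with_overlap st.1 (pats.getD j [])
  if (np.length : Int) ≤ mc then (np, st.2 ++ [names.getD j ""]) else st

-- the state A's inner loop reaches for subset i (processing bits of i in ascending order)
def pvFold (pats : List (List Char)) (names : List String) (mc : Int) (i : Nat)
    (st : List Char × List String) (js : List Nat) : List Char × List String :=
  js.foldl (fun st j => if i &&& (1 <<< j) ≠ 0 then pvStep pats names mc st j else st) st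

def pvSpec (pats : List (List Char)) (names : List String) (mc : Int) (n i : Nat) :
    List Char × List String :=
  pvFold pats names mc i ([], []) (List.range n)

theorem pv_bit_iff (i j : Nat) : (i &&& (1 <<< j) ≠ 0) ↔ i.testBit j := by
  rw [Nat.shiftLeft_eq, one_mul, Nat.and_two_pow]
  rcases h : i.testBit j <;> simp

-- skills accumulated by pvFold: the start list plus a sublist of names restricted to js;
-- if nothing was appended the whole state is unchanged
theorem pvFold_shape (pats : List (List Char)) (names : List String) (mc : Int) (i : Nat) :
    ∀ (js : List Nat) (st : List Char × List String),
      ∃ t, (pvFold pats names mc i st js).2 = st.2 ++ t ∧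
        t.Sublist (js.map (fun j => names.getD j "")) ∧
        (t = [] → pvFold pats names mc i st js = st) := by
  intro js
  induction js with
  | nil => intro st; exact ⟨[], by simp [pvFold]⟩
  | cons j js ih =>
    intro st
    have hstep : pvFold pats names mc i st (j :: js) =
        pvFold pats names mc i (if i &&& (1 <<< j) ≠ 0 then pvStep pats names mc st j else st) js := by
      simp [pvFold]
    by_cases hb : i &&& (1 <<< j) ≠ 0
    · rw [hstep, if_pos hb]
      unfold pvStep
      by_cases hok : ((concatenate_with_overlap st.1 (pats.getD j [])).length : Int) ≤ mc
      · rw [if_pos hok]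
        obtain ⟨t, h1, h2, h3⟩ := ih (concatenate_with_overlap st.1 (pats.getD j []), st.2 ++ [names.getD j ""])
        refine ⟨names.getD j "" :: t, ?_, ?_, ?_⟩
        · simpa using h1
        · simpa using List.Sublist.cons₂ (names.getD j "") h2
        · intro h; simp at h
      · rw [if_neg hok]
        obtain ⟨t, h1, h2, h3⟩ := ih st
        exact ⟨t, h1, List.sublist_cons_of_sublist _ h2, h3⟩
    · rw [hstep, if_neg hb]
      obtain ⟨t, h1, h2, h3⟩ := ih st
      exact ⟨t, h1, List.sublist_cons_of_sublist _ h2, h3⟩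

-- A's inner loop = pvFold plus the three dp cells at index i updated iff a skill was appended
theorem aInner_foldl (pats : List (List Char)) (names : List String) (mc : Int) (i : Nat) :
    ∀ (js : List Nat) (c : List Char) (s : List String)
      (dpc : List Int) (dpu : List (List String)) (dpp : List (List Char)),
      js.foldl (aInner pats names mc i) (c, s, dpc, dpu, dpp) =
        (let f := pvFold pats names mc i (c, s) js
         (f.1, f.2,
          if f.2 = s then dpc else dpc.set i ((PySem.Set.ofList f.2).length : Int),
          if f.2 = s then dpu else dpu.set i f.2,
          if f.2 = s then dpp else dpp.set i f.1)) := by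
  intro js
  induction js with
  | nil => intro c s dpc dpu dpp; simp [pvFold]
  | cons j js ih =>
    intro c s dpc dpu dpp
    rw [List.foldl_cons]
    have hstep : pvFold pats names mc i (c, s) (j :: js) =
        pvFold pats names mc i (if i &&& (1 <<< j) ≠ 0 then pvStep pats names mc (c, s) j else (c, s)) js := by
      simp [pvFold]
    by_cases hb : i &&& (1 <<< j) ≠ 0
    · by_cases hok : ((concatenate_with_overlap c (pats.getD j [])).length : Int) ≤ mc
      · have hA : aInner pats names mc i (c, s, dpc, dpu, dpp) j =
            (concatenate_with_overlap c (pats.getD j []), s ++ [names.getD j ""],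
             dpc.set i ((PySem.Set.ofList (s ++ [names.getD j ""])).length : Int),
             dpu.set i (s ++ [names.getD j ""]),
             dpp.set i (concatenate_with_overlap c (pats.getD j []))) := by
          show (if i &&& (1 <<< j) ≠ 0 then _ else _) = _
          rw [if_pos hb]
          show (if ((concatenate_with_overlap c (pats.getD j [])).length : Int) ≤ mc then _ else _) = _
          rw [if_pos hok]
        have hP : pvStep pats names mc (c, s) j =
            (concatenate_with_overlap c (pats.getD j []), s ++ [names.getD j ""]) := by
          show (if ((concatenate_with_overlap c (pats.getD j [])).length : Int) ≤ mc then _ else _) = _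
          rw [if_pos hok]
        rw [hA, ih, hstep, if_pos hb, hP]
        obtain ⟨t, h1, -, h3⟩ := pvFold_shape pats names mc i js
          (concatenate_with_overlap c (pats.getD j []), s ++ [names.getD j ""])
        set f := pvFold pats names mc i (concatenate_with_overlap c (pats.getD j []), s ++ [names.getD j ""]) js with hf
        simp only at h1 h3
        have hne : f.2 ≠ s := by
          rw [h1]; intro h
          have := congrArg List.length h
          simp at this
        show (f.1, f.2, _, _, _) = (f.1, f.2, _, _, _)
        by_cases ht : f.2 = s ++ [names.getD j ""]
        · have hfeq : f = (concatenate_with_overlap c (pats.getD j []), s ++ [names.getD j ""]) := by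
            apply h3
            have h4 := h1.symm.trans ht
            simpa using h4
          rw [if_pos ht, if_pos ht, if_pos ht, if_neg hne, if_neg hne, if_neg hne, ht, hfeq]
        · rw [if_neg ht, if_neg ht, if_neg ht, if_neg hne, if_neg hne, if_neg hne,
            List.set_set, List.set_set, List.set_set]
      · have hA : aInner pats names mc i (c, s, dpc, dpu, dpp) j = (c, s, dpc, dpu, dpp) := by
          show (if i &&& (1 <<< j) ≠ 0 then _ else _) = _
          rw [if_pos hb]
          show (if ((concatenate_with_overlap c (pats.getD j [])).length : Int) ≤ mc then _ else _) = _
          rw [if_neg hok]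
        have hP : pvStep pats names mc (c, s) j = (c, s) := by
          show (if ((concatenate_with_overlap c (pats.getD j [])).length : Int) ≤ mc then _ else _) = _
          rw [if_neg hok]
        rw [hA, ih, hstep, if_pos hb, hP]
    · have hA : aInner pats names mc i (c, s, dpc, dpu, dpp) j = (c, s, dpc, dpu, dpp) := by
        show (if i &&& (1 <<< j) ≠ 0 then _ else _) = _
        rw [if_neg hb]
      rw [hA, ih, hstep, if_neg hb]

-- after A's outer loop the three dp arrays are pointwise images of pvSpec
theorem a_outer (pats : List (List Char)) (names : List String) (mc : Int) (n : Nat) :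
    ∀ (k : Nat), k ≤ 1 <<< n →
      (List.range k).foldl
        (fun (acc : List Int × List (List String) × List (List Char)) i =>
          let (dpc, dpu, dpp) := acc
          let r := (List.range n).foldl (aInner pats names mc i) ([], [], dpc, dpu, dpp)
          (r.2.2.1, r.2.2.2.1, r.2.2.2.2))
        (List.replicate (1 <<< n) 0, List.replicate (1 <<< n) [], List.replicate (1 <<< n) []) =
      ((List.range k).map (fun i => ((PySem.Set.ofList (pvSpec pats names mc n i).2).length : Int))
         ++ List.replicate (1 <<< n - k) 0,
       (List.range k).map (fun i => (pvSpec pats names mc n i).2) ++ List.replicate (1 <<< n - k) [],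
       (List.range k).map (fun i => (pvSpec pats names mc n i).1) ++ List.replicate (1 <<< n - k) []) := by
  intro k
  induction k with
  | zero => intro _; simp
  | succ k ih =>
    intro hk
    rw [List.range_succ, List.foldl_append, ih (by omega), List.foldl_cons, List.foldl_nil]
    have hrep : ∀ {α : Type} (d : α), List.replicate (1 <<< n - k) d = d :: List.replicate (1 <<< n - (k+1)) d := by
      intro α d
      have : 1 <<< n - k = (1 <<< n - (k+1)) + 1 := by omega
      rw [this, List.replicate_succ]
    have hset : ∀ {α : Type} (g : Nat → α) (d v : α),
        ((List.range k).map g ++ List.replicate (1 <<< n - k) d).set k v =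
          (List.range k).map g ++ v :: List.replicate (1 <<< n - (k+1)) d := by
      intro α g d v
      rw [hrep, List.set_append]
      simp
    simp only []
    rw [aInner_foldl]
    simp only []
    have hspec : pvFold pats names mc k ([], []) (List.range n) = pvSpec pats names mc n k := rfl
    rw [hspec]
    by_cases hz : (pvSpec pats names mc n k).2 = []
    · have hzz : pvSpec pats names mc n k = ([], []) := by
        obtain ⟨t, h1, -, h3⟩ := pvFold_shape pats names mc k (List.range n) ([], [])
        have ht : t = [] := by rw [hspec] at h1; simpa [hz] using h1.symm
        rw [← hspec]; exact h3 ht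
      rw [if_pos hz, if_pos hz, if_pos hz]
      refine congrArg₂ _ ?_ (congrArg₂ _ ?_ ?_) <;>
        rw [hrep] <;> simp [hzz, PySem.Set.ofList]
    · rw [if_neg hz, if_neg hz, if_neg hz, hset, hset, hset]
      refine congrArg₂ _ ?_ (congrArg₂ _ ?_ ?_) <;> simp

-- bits of i below its top bit are the bits of i - 2^log2 i; the subset-DP recurrence
theorem pvSpec_rec (pats : List (List Char)) (names : List String) (mc : Int) (n i : Nat)
    (hpos : 0 < i) (hlt : i < 1 <<< n) :
    pvSpec pats names mc n i =
      pvStep pats names mc (pvSpec pats names mc n (i - (1 <<< i.log2))) i.log2 := by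
  have hsh : ∀ m : Nat, (1 : Nat) <<< m = 2 ^ m := by
    intro m; rw [Nat.shiftLeft_eq, one_mul]
  set h := i.log2 with hh
  set i' := i - (1 <<< h) with hi'
  have h2 : 2 ^ h ≤ i := Nat.log2_self_le (by omega)
  have h3 : i < 2 ^ (h + 1) := Nat.lt_log2_self
  have hdec : i = 2 ^ h + i' := by rw [hi', hsh]; omega
  have hi'lt : i' < 2 ^ h := by rw [hi', hsh]; rw [pow_succ] at h3; omega
  have hn : h < n := by
    rw [hsh] at hlt
    exact (Nat.pow_lt_pow_iff_right (by omega)).1 (lt_of_le_of_lt h2 hlt)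
  -- bits of i: equal to bits of i' below h, true at h, false above h
  have hbitlow : ∀ j, j < h → i.testBit j = i'.testBit j := by
    intro j hj; rw [hdec]; exact Nat.testBit_two_pow_add_gt hj i'
  have hbith : i.testBit h = true := by
    rw [hdec, Nat.testBit_two_pow_add_eq, Nat.testBit_lt_two_pow hi'lt]; rfl
  have hbithigh : ∀ j, h < j → i.testBit j = false := by
    intro j hj
    exact Nat.testBit_lt_two_pow (lt_of_lt_of_le h3 (Nat.pow_le_pow_right (by omega) hj))
  have hbit'high : ∀ j, h ≤ j → i'.testBit j = false := by
    intro j hj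
    exact Nat.testBit_lt_two_pow (lt_of_lt_of_le hi'lt (Nat.pow_le_pow_right (by omega) hj))
  -- fold over a suffix whose bits are all unset is the identity
  have hnoop : ∀ (m : Nat) (js : List Nat) (st : List Char × List String),
      (∀ j ∈ js, m.testBit j = false) → pvFold pats names mc m st js = st := by
    intro m js
    induction js with
    | nil => intro st _; rfl
    | cons j js ihj =>
      intro st hall
      have hb0 : m &&& (1 <<< j) = 0 := by
        by_contra hb
        have hbt : m.testBit j = true := (pv_bit_iff m j).1 hb
        rw [hall j (by simp)] at hbt
        exact Bool.false_ne_true hbt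
      have : pvFold pats names mc m st (j :: js) = pvFold pats names mc m st js := by
        simp [pvFold, hb0]
      rw [this]
      exact ihj st (fun j hj => hall j (by simp [hj]))
  have hsplit : List.range n = (List.range h ++ [h]) ++ (List.range (n - (h+1))).map ((h+1) + ·) := by
    conv_lhs => rw [show n = (h+1) + (n - (h+1)) by omega]
    rw [List.range_add, List.range_succ]
  have happ : ∀ (m : Nat) (st : List Char × List String) (l1 l2 : List Nat),
      pvFold pats names mc m st (l1 ++ l2) = pvFold pats names mc m (pvFold pats names mc m st l1) l2 := by
    intro m st l1 l2; simp [pvFold]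
  have hcongr : pvFold pats names mc i ([], []) (List.range h) =
      pvFold pats names mc i' ([], []) (List.range h) := by
    unfold pvFold
    apply PySem.List.foldl_congr_mem
    intro acc j hj
    have hj' : j < h := List.mem_range.1 hj
    have : (i &&& (1 <<< j) ≠ 0) ↔ (i' &&& (1 <<< j) ≠ 0) := by
      rw [pv_bit_iff, pv_bit_iff, hbitlow j hj']
    by_cases hc : i' &&& (1 <<< j) ≠ 0
    · rw [if_pos hc, if_pos (this.2 hc)]
    · rw [if_neg hc, if_neg (fun hx => hc (this.1 hx))]
  have htail : ∀ j ∈ (List.range (n - (h+1))).map ((h+1) + ·), i.testBit j = false := by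
    intro j hj
    obtain ⟨x, -, rfl⟩ := List.mem_map.1 hj
    exact hbithigh _ (by omega)
  have htail' : ∀ j ∈ [h] ++ (List.range (n - (h+1))).map ((h+1) + ·), i'.testBit j = false := by
    intro j hj
    rcases List.mem_append.1 hj with hj | hj
    · simp at hj; subst hj; exact hbit'high h le_rfl
    · obtain ⟨x, -, rfl⟩ := List.mem_map.1 hj
      exact hbit'high _ (by omega)
  have hbset : (i &&& (1 <<< h) ≠ 0) := by rw [pv_bit_iff, hbith]
  calc pvSpec pats names mc n i
      = pvFold pats names mc i ([], []) ((List.range h ++ [h]) ++ (List.range (n - (h+1))).map ((h+1) + ·)) := by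
        rw [pvSpec, ← hsplit]
    _ = pvFold pats names mc i (pvFold pats names mc i ([], []) (List.range h ++ [h]))
          ((List.range (n - (h+1))).map ((h+1) + ·)) := happ _ _ _ _
    _ = pvFold pats names mc i ([], []) (List.range h ++ [h]) := hnoop _ _ _ htail
    _ = pvStep pats names mc (pvFold pats names mc i ([], []) (List.range h)) h := by
        rw [happ]
        simp [pvFold, hbset]
    _ = pvStep pats names mc (pvFold pats names mc i' ([], []) (List.range h)) h := by rw [hcongr]
    _ = pvStep pats names mc (pvSpec pats names mc n i') h := by
        congr 1
        rw [pvSpec, hsplit, List.append_assoc, happ, hnoop i' _ _ htail']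

-- after B's loop, states is the pvSpec table
theorem b_states (pats : List (List Char)) (names : List String) (mc : Int) (n : Nat) :
    (List.range' 1 (1 <<< n - 1)).foldl
      (fun (states : List (List Char × List String)) i =>
        let h := i.log2
        let st := states.getD (i - (1 <<< h)) ([], [])
        let np := concatenate_with_overlap st.1 (pats.getD h [])
        if (np.length : Int) ≤ mc then states ++ [(np, st.2 ++ [names.getD h ""])]
        else states ++ [st])
      [([], [])] =
    (List.range (1 <<< n)).map (pvSpec pats names mc n) := by
  have hpow : 0 < 1 <<< n := by
    rw [Nat.shiftLeft_eq, one_mul]; exact Nat.pow_pos (by omega)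
  have hzero : pvSpec pats names mc n 0 = ([], []) := by
    unfold pvSpec pvFold
    induction List.range n with
    | nil => rfl
    | cons j js _ => simp
  have key : ∀ m, m + 1 ≤ 1 <<< n →
      (List.range' 1 m).foldl
        (fun (states : List (List Char × List String)) i =>
          let h := i.log2
          let st := states.getD (i - (1 <<< h)) ([], [])
          let np := concatenate_with_overlap st.1 (pats.getD h [])
          if (np.length : Int) ≤ mc then states ++ [(np, st.2 ++ [names.getD h ""])]
          else states ++ [st])
        [([], [])] =
      (List.range (m+1)).map (pvSpec pats names mc n) := by
    intro m
    induction m with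
    | zero => intro _; simp [hzero]
    | succ m ihm =>
      intro hm
      have hconc : List.range' 1 (m+1) = List.range' 1 m ++ [m+1] := by
        rw [List.range'_concat]; simp [Nat.add_comm]
      rw [hconc, List.foldl_append, ihm (by omega), List.foldl_cons, List.foldl_nil]
      simp only []
      have hpos' : 0 < m + 1 := by omega
      have hlt' : m + 1 < 1 <<< n := by omega
      have hple : (1 : Nat) <<< (m+1).log2 ≤ m + 1 := by
        rw [Nat.shiftLeft_eq, one_mul]; exact Nat.log2_self_le (by omega)
      have hidx : m + 1 - (1 <<< (m+1).log2) < m + 1 := by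
        have : (0:Nat) < 1 <<< (m+1).log2 := by
          rw [Nat.shiftLeft_eq, one_mul]; exact Nat.pow_pos (by omega)
        omega
      rw [PySem.List.getD_map_range _ _ _ _ hidx]
      have hrec := pvSpec_rec pats names mc n (m+1) hpos' hlt'
      have hsucc : (List.range (m+1+1)).map (pvSpec pats names mc n) =
          (List.range (m+1)).map (pvSpec pats names mc n) ++ [pvSpec pats names mc n (m+1)] := by
        rw [List.range_succ]; simp
      rw [hsucc, hrec]
      have hstepv : pvStep pats names mc (pvSpec pats names mc n (m + 1 - 1 <<< (m+1).log2)) ((m+1).log2) =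
          (if ((concatenate_with_overlap (pvSpec pats names mc n (m + 1 - 1 <<< (m+1).log2)).1
                (pats.getD ((m+1).log2) [])).length : Int) ≤ mc
           then (concatenate_with_overlap (pvSpec pats names mc n (m + 1 - 1 <<< (m+1).log2)).1
                   (pats.getD ((m+1).log2) []),
                 (pvSpec pats names mc n (m + 1 - 1 <<< (m+1).log2)).2 ++ [names.getD ((m+1).log2) ""])
           else pvSpec pats names mc n (m + 1 - 1 <<< (m+1).log2)) := rfl
      rw [hstepv]
      split_ifs <;> rfl
  have := key (1 <<< n - 1) (by omega)
  rw [this, Nat.sub_add_cancel hpow]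

theorem pvSpec_skills_nodup (pats : List (List Char)) (names : List String) (mc : Int)
    (n i : Nat) (hn : n = names.length) (hnd : names.Nodup) :
    (pvSpec pats names mc n i).2.Nodup := by
  obtain ⟨t, h1, h2, -⟩ := pvFold_shape pats names mc i (List.range n) ([], [])
  have hmap : (List.range names.length).map (fun j => names.getD j "") = names := by
    apply List.ext_getElem
    · simp
    · intro j hj hj'
      simp [List.getD_eq_getElem?_getD, List.getElem?_eq_getElem (by simpa using hj')]
  rw [hn] at h2
  rw [hmap] at h2
  have : (pvSpec pats names mc n i).2 = t := by simpa [hn] using h1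
  rw [this]
  exact List.Nodup.sublist h2 hnd

-- ===== VERDICT (by name: the statement is the Claim_ definition above) =====
theorem find_maximum_concatenation_spec : Claim_equal_find_maximum_concatenation := by
  intro skills meridians_count _
  unfold Spec_find_maximum_concatenation
  unfold find_maximum_concatenation find_maximum_concatenation_alt
  simp only []
  set d := PySem.Dict.ofList skills with hd
  set names := d.keys with hnames
  set pats := d.values.map String.toList with hpats
  have hnd : names.Nodup := PySem.Dict.nodup_keys_ofList skills
  have hlen : names.length = pats.length := by
    simp [hnames, hpats, PySem.Dict.keys, PySem.Dict.values]
  set n := pats.length with hn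
  rw [hlen]
  rw [a_outer pats names meridians_count n (1 <<< n) le_rfl]
  rw [b_states pats names meridians_count n]
  simp only [Nat.sub_self, List.replicate_zero, List.append_nil]
  have hcnt : (List.range (1 <<< n)).map
        (fun i => ((PySem.Set.ofList (pvSpec pats names meridians_count n i).2).length : Int)) =
      ((List.range (1 <<< n)).map (pvSpec pats names meridians_count n)).map
        (fun s => ((s.2.length : Int))) := by
    rw [List.map_map]
    apply List.map_congr_left
    intro i _
    simp only [Function.comp_apply]
    rw [PySem.Set.ofList_eq_self_of_nodup _
      (pvSpec_skills_nodup pats names meridians_count n i hlen.symm hnd)]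
  rw [hcnt]
  congr 1
  apply PySem.List.foldl_congr_mem
  intro acc i hi
  have hilt : i < 1 <<< n := List.mem_range.1 hi
  rw [List.map_map, PySem.List.getD_map_range _ _ _ _ hilt,
    PySem.List.getD_map_range _ _ _ _ hilt, PySem.List.getD_map_range _ _ _ _ hilt,
    PySem.List.getD_map_range _ _ _ _ hilt]
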